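-- pv_equiv track=rewrite | github.com/Coidemo/TextffCut | domain/use_cases/text_difference_detector.py | _map_position_with_spaces
-- ===== SOURCE A (Python) =====
-- def _map_position_with_spaces(
--
--     text_with_spaces: str,
--     text_no_spaces: str,
--     position_no_spaces: int
-- ) -> int:
--     """スペースなしの位置をスペースありの位置にマッピング"""
--     char_count = 0
--     for i, char in enumerate(text_with_spaces):
--         if char != " ":
--             if char_count == position_no_spaces:
--                 return i
--             char_count += 1
--     return -1
-- ===== SOURCE B (Python) =====
-- def _map_position_with_spaces(
--     text_with_spaces: str,
--     text_no_spaces: str,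
--     position_no_spaces: int
-- ) -> int:
--     """スペースなしの位置をスペースありの位置にマッピング"""
--     if position_no_spaces < 0:
--         return -1
--     # Shift the target index right once for every space at or before it:
--     # each space at index s <= j pushes the answer one position further.
--     j = position_no_spaces
--     space_positions = [i for i, c in enumerate(text_with_spaces) if c == " "]
--     for s in space_positions:
--         if s <= j:
--             j += 1
--         else:
--             break
--     return j if j < len(text_with_spaces) else -1
-- ===== Notes on version B (the rewrite author's own statement) =====
-- stated objective: alternative
-- what changed: Instead of scanning all characters counting non-spaces until the count hits the target, B treats the target rank itself as a candidate index and shifts it right once for each space position at or before it (iterating over the sorted space positions), then bounds-checks the result.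
import Mathlib
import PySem

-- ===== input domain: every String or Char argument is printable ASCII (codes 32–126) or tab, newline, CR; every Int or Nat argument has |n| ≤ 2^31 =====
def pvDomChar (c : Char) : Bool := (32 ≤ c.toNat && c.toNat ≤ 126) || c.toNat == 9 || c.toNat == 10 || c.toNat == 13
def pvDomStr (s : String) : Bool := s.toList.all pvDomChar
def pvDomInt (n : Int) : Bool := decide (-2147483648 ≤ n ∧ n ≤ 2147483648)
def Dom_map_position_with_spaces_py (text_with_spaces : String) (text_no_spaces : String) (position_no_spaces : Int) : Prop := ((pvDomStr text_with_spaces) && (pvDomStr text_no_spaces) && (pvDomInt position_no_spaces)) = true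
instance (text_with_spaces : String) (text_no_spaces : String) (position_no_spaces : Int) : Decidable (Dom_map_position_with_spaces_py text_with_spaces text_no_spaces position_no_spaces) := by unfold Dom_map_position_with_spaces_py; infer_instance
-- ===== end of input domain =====

-- B replaces A's count-the-non-spaces scan by shifting the target rank right over
-- the sorted space positions, then a bounds check; objective: alternative.

-- ===== PORT A =====
-- A's for-loop over enumerate(text_with_spaces) with char_count state and early return
def pvALoop (cs : List Char) (i : Int) (char_count : Int) (pos : Int) : Int :=
  match cs with
  | [] => -1
  | c :: rest =>
    if c ≠ ' ' then
      if char_count = pos then i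
      else pvALoop rest (i + 1) (char_count + 1) pos
    else pvALoop rest (i + 1) char_count pos

def map_position_with_spaces_py (text_with_spaces : String) (text_no_spaces : String) (position_no_spaces : Int) : Int :=
  pvALoop text_with_spaces.toList 0 0 position_no_spaces

-- ===== PORT B =====
-- space_positions = [i for i, c in enumerate(text_with_spaces) if c == " "]
def pvSpacePos (cs : List Char) (i : Int) : List Int :=
  match cs with
  | [] => []
  | c :: rest => if c = ' ' then i :: pvSpacePos rest (i + 1) else pvSpacePos rest (i + 1)

-- for s in space_positions: if s <= j: j += 1 else: break
def pvShift (sps : List Int) (j : Int) : Int :=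
  match sps with
  | [] => j
  | s :: rest => if s ≤ j then pvShift rest (j + 1) else j

def map_position_with_spaces_py_alt (text_with_spaces : String) (text_no_spaces : String) (position_no_spaces : Int) : Int :=
  if position_no_spaces < 0 then -1
  else
    let j := pvShift (pvSpacePos text_with_spaces.toList 0) position_no_spaces
    if j < (text_with_spaces.toList.length : Int) then j else -1

-- ===== PRECONDITION & SPEC =====
def Spec_map_position_with_spaces_py (text_with_spaces : String) (text_no_spaces : String) (position_no_spaces : Int) (out : Int) : Prop := out = map_position_with_spaces_py_alt text_with_spaces text_no_spaces position_no_spaces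
instance (text_with_spaces : String) (text_no_spaces : String) (position_no_spaces : Int) (out : Int) : Decidable (Spec_map_position_with_spaces_py text_with_spaces text_no_spaces position_no_spaces out) := by unfold Spec_map_position_with_spaces_py; infer_instance

-- ===== CLAIM (what is proved, stated in full; the proofs are below) =====
def Claim_equal_map_position_with_spaces_py : Prop := ∀ (text_with_spaces : String) (text_no_spaces : String) (position_no_spaces : Int), Dom_map_position_with_spaces_py text_with_spaces text_no_spaces position_no_spaces → Spec_map_position_with_spaces_py text_with_spaces text_no_spaces position_no_spaces (map_position_with_spaces_py text_with_spaces text_no_spaces position_no_spaces)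

-- ===== LEMMAS AND PROOFS =====
-- A returns -1 when the target rank is below the running count (it only grows).
theorem pvALoop_neg (cs : List Char) (i cc pos : Int) (h : pos < cc) :
    pvALoop cs i cc pos = -1 := by
  induction cs generalizing i cc with
  | nil => rfl
  | cons c rest ih =>
    simp only [pvALoop]
    by_cases hc : c = ' '
    · simp [hc, ih _ _ h]
    · have hne : cc ≠ pos := by omega
      simp [hc, hne, ih (i + 1) (cc + 1) (by omega)]

-- pvALoop depends on pos and char_count only through their difference.
theorem pvALoop_sub (cs : List Char) (i cc pos : Int) :
    pvALoop cs i cc pos = pvALoop cs i 0 (pos - cc) := by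
  induction cs generalizing i cc pos with
  | nil => rfl
  | cons c rest ih =>
    simp only [pvALoop]
    by_cases hc : c = ' '
    · rw [if_neg (by simp [hc]), if_neg (by simp [hc])]
      exact ih (i + 1) cc pos
    · rw [if_pos (show c ≠ ' ' from hc), if_pos (show c ≠ ' ' from hc)]
      by_cases he : cc = pos
      · rw [if_pos he, if_pos (by omega)]
      · rw [if_neg he, if_neg (show (0 : Int) ≠ pos - cc by omega)]
        rw [ih (i + 1) (cc + 1) pos, ih (i + 1) (0 + 1) (pos - cc)]
        congr 1
        omega

-- every space position generated with offset i is ≥ i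
theorem pvSpacePos_ge (cs : List Char) (i : Int) :
    ∀ s ∈ pvSpacePos cs i, i ≤ s := by
  induction cs generalizing i with
  | nil => simp [pvSpacePos]
  | cons c rest ih =>
    intro s hs
    simp only [pvSpacePos] at hs
    by_cases hc : c = ' '
    · simp [hc] at hs
      rcases hs with h | h
      · omega
      · have := ih (i + 1) s h; omega
    · simp [hc] at hs
      have := ih (i + 1) s hs; omega

-- the shift loop stops immediately when all positions are beyond j
theorem pvShift_stop (sps : List Int) (j : Int) (h : ∀ s ∈ sps, j < s) :
    pvShift sps j = j := by
  cases sps with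
  | nil => rfl
  | cons s rest =>
    have hs := h s (by simp)
    simp only [pvShift]
    rw [if_neg (by omega)]

-- congruence for the final bounds-checked lookup
theorem pvIfCongr (j1 j2 b1 b2 : Int) (hj : j1 = j2) (hb : b1 = b2) :
    (if j1 < b1 then j1 else -1) = (if j2 < b2 then j2 else -1) := by
  subst hj; subst hb; rfl

-- main invariant: A's scan equals shifting the rank over the space positions
theorem pvALoop_eq_shift (cs : List Char) (i pos : Int) (hpos : 0 ≤ pos) :
    pvALoop cs i 0 pos =
      (let j := pvShift (pvSpacePos cs i) (i + pos);
       if j < i + (cs.length : Int) then j else -1) := by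
  induction cs generalizing i pos with
  | nil =>
    simp only [pvALoop, pvSpacePos, pvShift, List.length_nil]
    rw [if_neg (by omega)]
  | cons c rest ih =>
    simp only [pvALoop, pvSpacePos, List.length_cons]
    by_cases hc : c = ' '
    · rw [if_neg (by simp [hc]), if_pos hc]
      simp only [pvShift]
      rw [if_pos (show i ≤ i + pos by omega)]
      rw [ih (i + 1) pos hpos]
      exact pvIfCongr _ _ _ _ (by rw [show (i + 1) + pos = i + pos + 1 by omega])
        (by push_cast; omega)
    · rw [if_pos (show c ≠ ' ' from hc), if_neg hc]
      by_cases he : (0 : Int) = pos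
      · rw [if_pos he]
        have hall : ∀ s ∈ pvSpacePos rest (i + 1), i + pos < s := by
          intro s hs
          have := pvSpacePos_ge rest (i + 1) s hs
          omega
        rw [pvShift_stop _ _ hall]
        rw [if_pos (by push_cast; omega), show i + pos = i by omega]
      · rw [if_neg he]
        rw [pvALoop_sub rest (i + 1) (0 + 1) pos]
        rw [show pos - (0 + 1) = pos - 1 by omega]
        rw [ih (i + 1) (pos - 1) (by omega)]
        exact pvIfCongr _ _ _ _ (by rw [show (i + 1) + (pos - 1) = i + pos by omega])
          (by push_cast; omega)

-- ===== VERDICT (by name: the statement is the Claim_ definition above) =====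
theorem map_position_with_spaces_py_spec : Claim_equal_map_position_with_spaces_py := by
  intro tws tns pos _
  unfold Spec_map_position_with_spaces_py map_position_with_spaces_py map_position_with_spaces_py_alt
  by_cases hneg : pos < 0
  · rw [if_pos hneg]
    exact pvALoop_neg _ _ _ _ (by omega)
  · rw [if_neg hneg]
    have h := pvALoop_eq_shift tws.toList 0 pos (by omega)
    simpa using h
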